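-- pv_equiv track=rewrite | github.com/Aasthaengg/IBMdataset | Python_codes/p03785/s539429256.py | solve
-- ===== SOURCE A (Python) =====
-- def solve(N, C, K, T):
--     T.sort()
--     i = 0
--     ans = 0
--     while i < N:
--         tk = T[i] + K
--         j0 = i
--         for j in range(j0, min(j0+C, N)):
--             if T[j] <= tk:
--                 i += 1
--             else:
--                 break
--         ans += 1
--     return ans
-- ===== SOURCE B (Python) =====
-- def solve(N, C, K, T):
--     T.sort()
--     i = 0
--     ans = 0
--     while i < N:
--         x = T[i] + K
--         # binary search for the first index in [i, N) whose time exceeds x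
--         lo, hi = i, N
--         while lo < hi:
--             mid = (lo + hi) // 2
--             if T[mid] <= x:
--                 lo = mid + 1
--             else:
--                 hi = mid
--         i += min(C, lo - i)
--         ans += 1
--     return ans
-- ===== Notes on version B (the rewrite author's own statement) =====
-- stated objective: alternative
-- what changed: Each group's boundary is found by a hand-written binary search over the sorted list (then capped by the capacity C) instead of A's element-by-element scan-and-break of up to C elements per group.
import Mathlib
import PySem

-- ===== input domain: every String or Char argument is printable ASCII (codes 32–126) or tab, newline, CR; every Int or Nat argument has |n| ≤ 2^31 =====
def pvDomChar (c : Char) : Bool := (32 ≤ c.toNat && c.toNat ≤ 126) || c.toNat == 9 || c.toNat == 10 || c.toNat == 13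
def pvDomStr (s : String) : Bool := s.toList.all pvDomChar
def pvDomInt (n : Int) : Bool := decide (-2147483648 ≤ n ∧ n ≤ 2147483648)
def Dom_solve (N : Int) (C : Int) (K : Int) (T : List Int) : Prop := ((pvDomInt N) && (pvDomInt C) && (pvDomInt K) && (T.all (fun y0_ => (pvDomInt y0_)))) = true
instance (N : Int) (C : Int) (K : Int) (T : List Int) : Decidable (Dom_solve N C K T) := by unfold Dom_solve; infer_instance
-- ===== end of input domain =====

-- B replaces A's per-group element-by-element scan with a binary search for the group
-- boundary (capped by the capacity C). Both A and B sort the argument list in place in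
-- Python; the equivalence proved here is about the return value (the mutation is identical).

-- ===== PORT A =====
-- Port of A's inner 'for j in range(j0, min(j0+C, N)): if T[j] <= tk: i += 1 else: break'.
def innerA (S : List Int) (tk : Int) : List Int → Int → Int
  | [], i => i
  | j :: js, i => if PySem.List.pyGetD S j 0 ≤ tk then innerA S tk js (i + 1) else i

-- Port of A's 'while i < N' loop; fuel makes it total (under Pre_ the fuel N.toNat + 1
-- is never exhausted, since each iteration advances i by at least 1).
def loopA (N C K : Int) (S : List Int) : Nat → Int → Int → Int
  | 0, _, ans => ans
  | fuel + 1, i, ans =>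
    if i < N then
      loopA N C K S fuel
        (innerA S (PySem.List.pyGetD S i 0 + K) (PySem.List.pyRange i (min (i + C) N) 1) i)
        (ans + 1)
    else ans

def solve (N : Int) (C : Int) (K : Int) (T : List Int) : Int :=
  loopA N C K (PySem.List.sorted T (fun t => t) false) (N.toNat + 1) 0 0

-- ===== PORT B =====
-- Port of B's hand-written binary search 'while lo < hi: mid = (lo+hi)//2; …'.
def bsearchB (S : List Int) (x : Int) (lo hi : Int) : Int :=
  if h : lo < hi then
    let mid := PySem.Int.floordiv (lo + hi) 2
    if PySem.List.pyGetD S mid 0 ≤ x then bsearchB S x (mid + 1) hi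
    else bsearchB S x lo mid
  else lo
termination_by (hi - lo).toNat
decreasing_by
  · have h1 := PySem.Int.floordiv_two_mid_bounds (le_of_lt h)
    omega
  · have h2 : PySem.Int.floordiv (lo + hi) 2 < hi := by
      have := (PySem.Int.floordiv_lt_iff_lt_mul (a := lo + hi) (b := 2) (q := hi) (by omega)).mpr
        (by omega)
      exact this
    omega

-- Port of B's 'while i < N' loop (same fuel discipline as A's port).
def loopB (N C K : Int) (S : List Int) : Nat → Int → Int → Int
  | 0, _, ans => ans
  | fuel + 1, i, ans =>
    if i < N then
      let x := PySem.List.pyGetD S i 0 + K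
      let lo := bsearchB S x i N
      loopB N C K S fuel (i + min C (lo - i)) (ans + 1)
    else ans

def solve_alt (N : Int) (C : Int) (K : Int) (T : List Int) : Int :=
  loopB N C K (PySem.List.sorted T (fun t => t) false) (N.toNat + 1) 0 0

-- ===== PRECONDITION & SPEC =====
-- Pre_ excludes exactly the inputs on which Python A does not return: N > len(T) raises
-- IndexError (T[i] for some i < N), and for 0 < N either C ≤ 0 (the inner for-range is
-- empty, i never advances) or K < 0 (T[i] <= T[i]+K fails immediately) makes the while
-- loop run forever.
def Pre_solve (N : Int) (C : Int) (K : Int) (T : List Int) : Prop :=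
  N ≤ (T.length : Int) ∧ (0 < N → 1 ≤ C ∧ 0 ≤ K)
instance (N : Int) (C : Int) (K : Int) (T : List Int) : Decidable (Pre_solve N C K T) := by
  unfold Pre_solve; infer_instance

def pvWitness_solve : Int × Int × Int × List Int := (4, 2, 3, [8, 2, 5, 1])

def Spec_solve (N : Int) (C : Int) (K : Int) (T : List Int) (out : Int) : Prop := out = solve_alt N C K T
instance (N : Int) (C : Int) (K : Int) (T : List Int) (out : Int) : Decidable (Spec_solve N C K T out) := by unfold Spec_solve; infer_instance

-- ===== CLAIM (what is proved, stated in full; the proofs are below) =====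
def Claim_equal_solve : Prop := ∀ (N : Int) (C : Int) (K : Int) (T : List Int), Dom_solve N C K T → Pre_solve N C K T → Spec_solve N C K T (solve N C K T)

-- ===== LEMMAS AND PROOFS =====

-- A's inner scan returns i plus the length of the satisfied prefix of the index list.
theorem innerA_eq_takeWhile (S : List Int) (tk : Int) :
    ∀ (js : List Int) (i : Int),
      innerA S tk js i
        = i + ((js.takeWhile (fun j => decide (PySem.List.pyGetD S j 0 ≤ tk))).length : Int) := by
  intro js
  induction js with
  | nil => intro i; simp [innerA]
  | cons j js ih =>
      intro i
      by_cases h : PySem.List.pyGetD S j 0 ≤ tk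
      · simp [innerA, h, ih]
        omega
      · simp [innerA, h]

-- takeWhile over a consecutive index range when the predicate holds exactly below L.
theorem takeWhile_pyRange_threshold (P : Int → Bool) :
    ∀ (n : Nat) (i m L : Int), (m - i).toNat = n → i ≤ L → L ≤ m →
      (∀ j : Int, i ≤ j → j < m → (P j = true ↔ j < L)) →
      (((PySem.List.pyRange i m 1).takeWhile P).length : Int) = L - i := by
  intro n
  induction n with
  | zero =>
      intro i m L hn hiL hLm _
      rw [PySem.List.pyRange_one_eq_nil (by omega)]
      simp; omega
  | succ n ih =>
      intro i m L hn hiL hLm hP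
      rw [PySem.List.pyRange_one_cons (by omega)]
      by_cases hiLlt : i < L
      · have hPi : P i = true := (hP i le_rfl (by omega)).mpr hiLlt
        rw [List.takeWhile_cons_of_pos hPi]
        have := ih (i + 1) m L (by omega) (by omega) hLm
          (fun j hj1 hj2 => hP j (by omega) hj2)
        simp only [List.length_cons]
        push_cast
        omega
      · have hLi : L = i := le_antisymm (by omega) hiL
        have hPi : P i = false := by
          have := hP i le_rfl (by omega)
          cases hPv : P i
          · rfl
          · exact absurd (this.mp hPv) (by omega)
        rw [List.takeWhile_cons_of_neg (by simp [hPi])]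
        simp; omega

-- B's binary search finds the partition point of the ≤ x prefix on [lo, hi).
theorem bsearchB_spec (S : List Int) (x : Int)
    (hmono : ∀ p q : Int, 0 ≤ p → p ≤ q → q < (S.length : Int) →
      PySem.List.pyGetD S p 0 ≤ PySem.List.pyGetD S q 0) :
    ∀ (n : Nat) (lo hi : Int), (hi - lo).toNat = n → 0 ≤ lo → lo ≤ hi → hi ≤ (S.length : Int) →
      lo ≤ bsearchB S x lo hi ∧ bsearchB S x lo hi ≤ hi ∧
      (∀ j : Int, lo ≤ j → j < bsearchB S x lo hi → PySem.List.pyGetD S j 0 ≤ x) ∧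
      (∀ j : Int, bsearchB S x lo hi ≤ j → j < hi → x < PySem.List.pyGetD S j 0) := by
  intro n
  induction n using Nat.strong_induction_on with
  | _ n ih =>
    intro lo hi hn h0 hlh hhl
    by_cases h : lo < hi
    · have hmid := PySem.Int.floordiv_two_mid_bounds (le_of_lt h)
      have hmidlt : PySem.Int.floordiv (lo + hi) 2 < hi :=
        (PySem.Int.floordiv_lt_iff_lt_mul (by omega)).mpr (by omega)
      set mid := PySem.Int.floordiv (lo + hi) 2 with hmiddef
      by_cases hle : PySem.List.pyGetD S mid 0 ≤ x
      · have hrw : bsearchB S x lo hi = bsearchB S x (mid + 1) hi := by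
          rw [bsearchB]; simp only [dif_pos h, ← hmiddef, if_pos hle]
        have hrec := ih (hi - (mid + 1)).toNat (by omega) (mid + 1) hi rfl (by omega)
          (by omega) hhl
        rw [hrw]
        refine ⟨by omega, hrec.2.1, ?_, hrec.2.2.2⟩
        intro j hj1 hj2
        by_cases hjm : j ≤ mid
        · exact le_trans (hmono j mid (by omega) hjm (by omega)) hle
        · exact hrec.2.2.1 j (by omega) hj2
      · have hrw : bsearchB S x lo hi = bsearchB S x lo mid := by
          rw [bsearchB]; simp only [dif_pos h, ← hmiddef, if_neg hle]
        have hrec := ih (mid - lo).toNat (by omega) lo mid rfl h0 (by omega) (by omega)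
        rw [hrw]
        refine ⟨hrec.1, by omega, hrec.2.2.1, ?_⟩
        intro j hj1 hj2
        by_cases hjm : mid ≤ j
        · exact lt_of_not_ge (fun hc => hle (le_trans (hmono mid j (by omega) hjm (by omega)) hc))
        · exact hrec.2.2.2 j hj1 (by omega)
    · rw [bsearchB]
      simp [h]
      constructor
      · omega
      · exact ⟨fun j hj1 hj2 => absurd hj2 (by omega), fun j hj1 hj2 => absurd hj2 (by omega)⟩

-- One iteration: A's scan-and-break advances i to the same index as B's capped binary search.
theorem step_eq (S : List Int) (N C K i : Int)
    (hmono : ∀ p q : Int, 0 ≤ p → p ≤ q → q < (S.length : Int) →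
      PySem.List.pyGetD S p 0 ≤ PySem.List.pyGetD S q 0)
    (hN : N ≤ (S.length : Int)) (hC : 1 ≤ C) (h0 : 0 ≤ i) (hiN : i < N) :
    innerA S (PySem.List.pyGetD S i 0 + K) (PySem.List.pyRange i (min (i + C) N) 1) i
      = i + min C (bsearchB S (PySem.List.pyGetD S i 0 + K) i N - i) := by
  set x := PySem.List.pyGetD S i 0 + K with hx
  have hbs := bsearchB_spec S x hmono (N - i).toNat i N rfl h0 (le_of_lt hiN) hN
  set L := bsearchB S x i N with hL
  set m := min (i + C) N with hm
  have hLm : min L m ≤ m := min_le_right _ _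
  have hiL' : i ≤ min L m := le_min hbs.1 (by omega)
  rw [innerA_eq_takeWhile]
  rw [takeWhile_pyRange_threshold _ (m - i).toNat i m (min L m) rfl hiL' hLm ?_]
  · omega
  · intro j hj1 hj2
    constructor
    · intro hPj
      simp only [decide_eq_true_eq] at hPj
      by_cases hjL : j < L
      · omega
      · exact absurd hPj (not_le.mpr (hbs.2.2.2 j (by omega) (by omega)))
    · intro hjL
      simp only [decide_eq_true_eq]
      exact hbs.2.2.1 j hj1 (by omega)

-- The two fuelled while-loops agree step by step.
theorem loop_eq (S : List Int) (N C K : Int)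
    (hmono : ∀ p q : Int, 0 ≤ p → p ≤ q → q < (S.length : Int) →
      PySem.List.pyGetD S p 0 ≤ PySem.List.pyGetD S q 0)
    (hN : N ≤ (S.length : Int)) (hC : 1 ≤ C) :
    ∀ (fuel : Nat) (i ans : Int), 0 ≤ i →
      loopA N C K S fuel i ans = loopB N C K S fuel i ans := by
  intro fuel
  induction fuel with
  | zero => intro i ans _; rfl
  | succ fuel ih =>
      intro i ans h0
      by_cases h : i < N
      · simp only [loopA, loopB, if_pos h]
        rw [step_eq S N C K i hmono hN hC h0 h]
        have hbs := bsearchB_spec S (PySem.List.pyGetD S i 0 + K) hmono (N - i).toNat i N rfl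
          h0 (le_of_lt h) hN
        exact ih _ _ (by omega)
      · simp only [loopA, loopB, if_neg h]

-- Monotonicity of the sorted list, phrased on Int indices through pyGetD.
theorem sorted_pyGetD_mono (T : List Int) :
    ∀ p q : Int, 0 ≤ p → p ≤ q → q < ((PySem.List.sorted T (fun t => t) false).length : Int) →
      PySem.List.pyGetD (PySem.List.sorted T (fun t => t) false) p 0
        ≤ PySem.List.pyGetD (PySem.List.sorted T (fun t => t) false) q 0 := by
  intro p q hp hpq hq
  set S := PySem.List.sorted T (fun t => t) false with hS
  have hql : q.toNat < S.length := by omega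
  have hpl : p.toNat < S.length := by omega
  rw [PySem.List.pyGetD_eq_getElem S 0 hp (by omega),
      PySem.List.pyGetD_eq_getElem S 0 (by omega) (by omega)]
  exact PySem.List.sorted_id_getElem_mono (xs := T) (by omega) hql

-- ===== VERDICT (by name: the statement is the Claim_ definition above) =====
theorem solve_spec : Claim_equal_solve := by
  intro N C K T _ hpre
  unfold Spec_solve solve solve_alt
  rcases hpre with ⟨hNlen, hNC⟩
  by_cases hN : 0 < N
  · have hlen : N ≤ ((PySem.List.sorted T (fun t => t) false).length : Int) := by
      rw [PySem.List.length_sorted]; exact hNlen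
    exact loop_eq _ N C K (sorted_pyGetD_mono T) hlen (hNC hN).1 _ 0 0 le_rfl
  · have hfuel : N.toNat + 1 = 0 + 1 := by omega
    rw [hfuel]
    simp only [loopA, loopB, if_neg (by omega : ¬ (0 : Int) < N)]
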